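-- pv_equiv track=rewrite | github.com/Aaron-Loera/Insider-Threat-Detection | scripts/ThreatClassifier.py | classify_threat
-- ===== SOURCE A (Python) =====
-- THREAT_FEATURE_MAP: dict[str, set[str]] = {
--     "Exfiltration: Removable Media": {
--         "usb_insert_count",
--         "usb_remove_count",
--         "file_copy_count",
--         "off_hours_usb_usage",
--         "usb_file_activity_flag",
--     },
--     "Exfiltration: Email": {
--         "external_emails_sent",
--         "attachments_sent",
--         "unique_recipients",
--         "off_hours_emails",
--         "external_comm_activity_flag",
--     },
--     "Exfiltration: Cloud/Web": {
--         "http_upload_count",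
--         "http_cloud_storage_visits",
--         "cloud_upload_flag",
--         "suspicious_upload_flag",
--     },
--     "Unauthorized Access": {
--         "off_hours_logon",
--         "non_primary_pc_used_flag",
--         "non_primary_pc_risk_flag",
--         "pcs_used_count",
--     },
--     "Suspicious Browsing": {
--         "http_jobsite_visits",
--         "http_suspicious_site_visits",
--         "http_long_url_count",
--         "jobsite_usb_activity_flag",
--     },
-- }
--
-- FALLBACK: str = "General Anomaly"
--
-- def _normalize(feature: str) -> str:
--     """
--     Normalises a feature name for robust matching.
--     Strips _zscore and _rolling_delta suffixes added during preprocessing,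
--     then lowercases, so the classifier is resilient to enriched column names.
--     """
--     name = feature.lower().strip()
--     for suffix in ("_zscore", "_rolling_delta"):
--         if name.endswith(suffix):
--             name = name[: -len(suffix)]
--             break
--     return name
--
-- def classify_threat(top_contributors: list) -> str:
--     """
--     Classifies an alert's threat scenario from its top contributing features.
--
--     For each threat category, counts how many of the incoming features appear
--     in that category's trigger set. The category with the highest unique overlap
--     count wins. Returns FALLBACK ("General Anomaly") when overlap is zero or
--     when two or more categories share the top score (no single scenario dominates).
--
--     Args:
--         top_contributors: List of (feature_name, contribution_value) tuples,
--                           as produced by AlertObjectBuilder.extract_top_contributors().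
--
--     Returns:
--         str: The matched threat category, or "General Anomaly" if unclear.
--     """
--     if not top_contributors:
--         return FALLBACK
--
--     # Normalise incoming feature names
--     incoming = {_normalize(feat) for feat, _ in top_contributors}
--
--     # Score each category by feature overlap
--     scores = {
--         category: len(incoming & feature_set)
--         for category, feature_set in THREAT_FEATURE_MAP.items()
--     }
--
--     max_overlap = max(scores.values())
--
--     # No features matched any known category
--     if max_overlap == 0:
--         return FALLBACK
--
--     # Collect all categories tied at the top overlap count
--     winners = [cat for cat, count in scores.items() if count == max_overlap]
--
--     # A tie means no single scenario dominates — fall back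
--     if len(winners) > 1:
--         return FALLBACK
--
--     return winners[0]
-- ===== SOURCE B (Python) =====
-- THREAT_FEATURE_MAP: dict[str, set[str]] = {
--     "Exfiltration: Removable Media": {
--         "usb_insert_count",
--         "usb_remove_count",
--         "file_copy_count",
--         "off_hours_usb_usage",
--         "usb_file_activity_flag",
--     },
--     "Exfiltration: Email": {
--         "external_emails_sent",
--         "attachments_sent",
--         "unique_recipients",
--         "off_hours_emails",
--         "external_comm_activity_flag",
--     },
--     "Exfiltration: Cloud/Web": {
--         "http_upload_count",
--         "http_cloud_storage_visits",
--         "cloud_upload_flag",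
--         "suspicious_upload_flag",
--     },
--     "Unauthorized Access": {
--         "off_hours_logon",
--         "non_primary_pc_used_flag",
--         "non_primary_pc_risk_flag",
--         "pcs_used_count",
--     },
--     "Suspicious Browsing": {
--         "http_jobsite_visits",
--         "http_suspicious_site_visits",
--         "http_long_url_count",
--         "jobsite_usb_activity_flag",
--     },
-- }
--
-- FALLBACK: str = "General Anomaly"
--
-- # Inverted index: trigger feature -> its (unique) category, built once.
-- _CATEGORY_OF = {
--     feature: category
--     for category, features in THREAT_FEATURE_MAP.items()
--     for feature in features
-- }
--
--
-- def _normalize(feature: str) -> str: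
--     name = feature.lower().strip()
--     for suffix in ("_zscore", "_rolling_delta"):
--         if name.endswith(suffix):
--             name = name[: -len(suffix)]
--             break
--     return name
--
--
-- def classify_threat(top_contributors: list) -> str:
--     if not top_contributors:
--         return FALLBACK
--
--     incoming = {_normalize(feat) for feat, _ in top_contributors}
--
--     # One pass over the features: vote for the owning category via the index.
--     counts = dict.fromkeys(THREAT_FEATURE_MAP, 0)
--     for feature in incoming:
--         category = _CATEGORY_OF.get(feature)
--         if category is not None:
--             counts[category] += 1
--
--     # Single-pass argmax with tie detection.
--     best, best_cat, tie = 0, None, False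
--     for category, n in counts.items():
--         if n > best:
--             best, best_cat, tie = n, category, False
--         elif n == best:
--             tie = True
--
--     return best_cat if best > 0 and not tie else FALLBACK
-- ===== Notes on version B (the rewrite author's own statement) =====
-- stated objective: alternative
-- what changed: B replaces A's per-category set-intersection scoring by a precomputed feature-to-category inverted index voted through in one pass over the features, and replaces A's max()-then-filter winner selection by a single-pass argmax with a tie flag.
import Mathlib
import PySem

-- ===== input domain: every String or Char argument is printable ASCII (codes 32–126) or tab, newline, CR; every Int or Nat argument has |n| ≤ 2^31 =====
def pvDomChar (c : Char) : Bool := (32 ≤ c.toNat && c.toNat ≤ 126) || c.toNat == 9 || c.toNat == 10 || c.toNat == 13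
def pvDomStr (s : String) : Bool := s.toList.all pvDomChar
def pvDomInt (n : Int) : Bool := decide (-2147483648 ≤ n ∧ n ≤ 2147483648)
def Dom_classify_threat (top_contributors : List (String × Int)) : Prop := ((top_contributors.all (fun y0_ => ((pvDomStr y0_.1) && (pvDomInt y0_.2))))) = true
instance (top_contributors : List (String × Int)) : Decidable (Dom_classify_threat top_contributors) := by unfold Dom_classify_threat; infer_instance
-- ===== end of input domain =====

-- B replaces A's per-category set intersections by a precomputed feature→category
-- inverted index voted through in one pass, and the max/filter winner selection by a
-- single-pass argmax with a tie flag (objective: alternative / idiomatic).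

-- ===== PORT A =====
def FALLBACK : String := "General Anomaly"

def THREAT_FEATURE_MAP : PySem.Dict String (PySem.Set String) :=
  PySem.Dict.ofList
    [ ("Exfiltration: Removable Media", PySem.Set.ofList
        ["usb_insert_count", "usb_remove_count", "file_copy_count",
         "off_hours_usb_usage", "usb_file_activity_flag"]),
      ("Exfiltration: Email", PySem.Set.ofList
        ["external_emails_sent", "attachments_sent", "unique_recipients",
         "off_hours_emails", "external_comm_activity_flag"]),
      ("Exfiltration: Cloud/Web", PySem.Set.ofList
        ["http_upload_count", "http_cloud_storage_visits", "cloud_upload_flag",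
         "suspicious_upload_flag"]),
      ("Unauthorized Access", PySem.Set.ofList
        ["off_hours_logon", "non_primary_pc_used_flag", "non_primary_pc_risk_flag",
         "pcs_used_count"]),
      ("Suspicious Browsing", PySem.Set.ofList
        ["http_jobsite_visits", "http_suspicious_site_visits", "http_long_url_count",
         "jobsite_usb_activity_flag"]) ]

-- _normalize: lower+strip, then chop the first matching suffix (loop with break = nested if)
def pyNormalize (feature : String) : String :=
  let name := PySem.Str.strip (PySem.Str.lower feature)
  if PySem.Str.endswith name "_zscore" then PySem.Str.slice name none (some (-7))
  else if PySem.Str.endswith name "_rolling_delta" then PySem.Str.slice name none (some (-14))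
  else name

def classify_threat (top_contributors : List (String × Int)) : String :=
  if top_contributors = [] then FALLBACK
  else
    let incoming : PySem.Set String :=
      PySem.Set.ofList (top_contributors.map (fun p => pyNormalize p.1))
    let scores : PySem.Dict String Int :=
      PySem.Dict.ofList (THREAT_FEATURE_MAP.items.map
        (fun p => (p.1, ((PySem.Set.inter incoming p.2).length : Int))))
    match PySem.List.max? scores.values (fun v => v) with
    | none => FALLBACK   -- unreachable: scores has five entries
    | some max_overlap =>
      if max_overlap == 0 then FALLBACK
      else
        let winners := (scores.items.filter (fun p => p.2 == max_overlap)).map (fun p => p.1)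
        if winners.length > 1 then FALLBACK
        else
          match winners with   -- winners[0]; nonempty since max_overlap is attained
          | w :: _ => w
          | [] => FALLBACK

-- ===== PORT B =====
-- inverted index {feature: category for category, features in THREAT_FEATURE_MAP.items() for feature in features}
def CATEGORY_OF : PySem.Dict String String :=
  PySem.Dict.ofList (THREAT_FEATURE_MAP.items.flatMap (fun p => p.2.map (fun f => (f, p.1))))

def classify_threat_alt (top_contributors : List (String × Int)) : String :=
  if top_contributors = [] then FALLBACK
  else
    let incoming : PySem.Set String :=
      PySem.Set.ofList (top_contributors.map (fun p => pyNormalize p.1))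
    -- counts = dict.fromkeys(THREAT_FEATURE_MAP, 0); one voting pass over the features
    let counts : PySem.Dict String Int :=
      incoming.foldl
        (fun d f =>
          match CATEGORY_OF.get? f with
          | some c => d.modify c 0 (· + 1)
          | none => d)
        (PySem.Dict.ofList (THREAT_FEATURE_MAP.keys.map (fun c => (c, (0 : Int)))))
    -- single-pass argmax with tie flag
    let r := counts.items.foldl
      (fun s p =>
        if p.2 > s.1 then (p.2, some p.1, false)
        else if p.2 == s.1 then (s.1, s.2.1, true)
        else s)
      ((0 : Int), (none : Option String), false)
    if r.1 > 0 && !r.2.2 then (r.2.1).getD FALLBACK else FALLBACK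

-- ===== PRECONDITION & SPEC =====
def Spec_classify_threat (top_contributors : List (String × Int)) (out : String) : Prop := out = classify_threat_alt top_contributors
instance (top_contributors : List (String × Int)) (out : String) : Decidable (Spec_classify_threat top_contributors out) := by unfold Spec_classify_threat; infer_instance

-- ===== CLAIM (what is proved, stated in full; the proofs are below) =====
def Claim_equal_classify_threat : Prop := ∀ (top_contributors : List (String × Int)), Dom_classify_threat top_contributors → Spec_classify_threat top_contributors (classify_threat top_contributors)


-- ===== LEMMAS AND PROOFS =====

-- The five categories, in THREAT_FEATURE_MAP's insertion order (proof helper).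
def pvCats : List String :=
  ["Exfiltration: Removable Media", "Exfiltration: Email", "Exfiltration: Cloud/Web",
   "Unauthorized Access", "Suspicious Browsing"]

-- CATEGORY_OF as a literal association list (proof helper).
def pvIdxList : List (String × String) :=
  [("usb_insert_count", "Exfiltration: Removable Media"), ("usb_remove_count", "Exfiltration: Removable Media"),
   ("file_copy_count", "Exfiltration: Removable Media"), ("off_hours_usb_usage", "Exfiltration: Removable Media"),
   ("usb_file_activity_flag", "Exfiltration: Removable Media"), ("external_emails_sent", "Exfiltration: Email"),
   ("attachments_sent", "Exfiltration: Email"), ("unique_recipients", "Exfiltration: Email"),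
   ("off_hours_emails", "Exfiltration: Email"), ("external_comm_activity_flag", "Exfiltration: Email"),
   ("http_upload_count", "Exfiltration: Cloud/Web"), ("http_cloud_storage_visits", "Exfiltration: Cloud/Web"),
   ("cloud_upload_flag", "Exfiltration: Cloud/Web"), ("suspicious_upload_flag", "Exfiltration: Cloud/Web"),
   ("off_hours_logon", "Unauthorized Access"), ("non_primary_pc_used_flag", "Unauthorized Access"),
   ("non_primary_pc_risk_flag", "Unauthorized Access"), ("pcs_used_count", "Unauthorized Access"),
   ("http_jobsite_visits", "Suspicious Browsing"), ("http_suspicious_site_visits", "Suspicious Browsing"),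
   ("http_long_url_count", "Suspicious Browsing"), ("jobsite_usb_activity_flag", "Suspicious Browsing")]

lemma pvIdx_eq : CATEGORY_OF = PySem.Dict.mk pvIdxList := by rfl

lemma pvIdx_nd : (PySem.Dict.mk pvIdxList).keys.Nodup := by decide

-- the common per-category score of a (deduplicated, normalised) feature list
def pvScores (inc : List String) : List (String × Int) :=
  pvCats.map (fun c => (c, (inc.countP (fun f => CATEGORY_OF.get? f == some c) : Int)))

-- A's result after the empty guard, as a function of the score table
def pvPostA (l : List (String × Int)) : String :=
  match PySem.List.max? (l.map (fun p => p.2)) (fun v => v) with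
  | none => FALLBACK
  | some m =>
    if m == 0 then FALLBACK
    else
      let winners := (l.filter (fun p => p.2 == m)).map (fun p => p.1)
      if winners.length > 1 then FALLBACK
      else match winners with
        | w :: _ => w
        | [] => FALLBACK

-- B's result after the empty guard, as a function of the score table
def pvPostB (l : List (String × Int)) : String :=
  let r := l.foldl
    (fun s p =>
      if p.2 > s.1 then (p.2, some p.1, false)
      else if p.2 == s.1 then (s.1, s.2.1, true)
      else s)
    ((0 : Int), (none : Option String), false)
  if r.1 > 0 && !r.2.2 then (r.2.1).getD FALLBACK else FALLBACK

-- every hit of the inverted index names one of the five categories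
lemma pvIdx_cats (f c : String) (h : CATEGORY_OF.get? f = some c) : c ∈ pvCats := by
  rw [pvIdx_eq, PySem.Dict.get?_eq_some_iff_mem_items _ _ _ pvIdx_nd] at h
  have h2 := List.mem_map_of_mem (f := Prod.snd) h
  have hall : ∀ x ∈ pvIdxList.map Prod.snd, x ∈ pvCats := by decide
  exact hall _ h2

-- pointwise, per entry of the feature map: the intersection size IS the index-hit count
lemma pvInterCount (inc : List String) :
    ∀ p ∈ THREAT_FEATURE_MAP.items,
      ((PySem.Set.inter inc p.2).length : Int)
        = (inc.countP (fun f => CATEGORY_OF.get? f == some p.1) : Int) := by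
  intro p hp
  have h1 : (PySem.Set.inter inc p.2).length = inc.countP (fun f => PySem.Set.contains p.2 f) := by
    rw [PySem.Set.inter, List.countP_eq_length_filter]
  rw [h1]
  congr 1
  apply List.countP_congr
  intro f _
  fin_cases hp <;>
    (rw [Bool.eq_iff_iff, pvIdx_eq, beq_iff_eq,
        PySem.Dict.get?_eq_some_iff_mem_items _ _ _ pvIdx_nd]
     simp [PySem.Set.contains, PySem.Set.ofList, PySem.Set.add, pvIdxList])

-- A-side: the scores dict's items are pvScores of the incoming features
lemma pvScoresA (inc : List String) :
    (PySem.Dict.ofList (THREAT_FEATURE_MAP.items.map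
      (fun p => (p.1, ((PySem.Set.inter inc p.2).length : Int))))).items = pvScores inc := by
  have hnd : ((THREAT_FEATURE_MAP.items.map
      (fun p => (p.1, ((PySem.Set.inter inc p.2).length : Int)))).map Prod.fst).Nodup := by
    have h : (THREAT_FEATURE_MAP.items.map
        (fun p => (p.1, ((PySem.Set.inter inc p.2).length : Int)))).map Prod.fst = pvCats := by rfl
    rw [h]; decide
  show ((THREAT_FEATURE_MAP.items.map
      (fun p => (p.1, ((PySem.Set.inter inc p.2).length : Int)))).foldl
      (fun acc p => acc.insert p.1 p.2) PySem.Dict.empty).items = _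
  rw [PySem.Dict.items_foldl_insert_fresh _ Prod.fst Prod.snd _
      (fun a _ => PySem.Dict.contains_empty a.1) hnd]
  have hcats : pvCats = THREAT_FEATURE_MAP.items.map Prod.fst := by rfl
  rw [pvScores, hcats, List.map_map, List.map_map]
  simp only [show (PySem.Dict.empty : PySem.Dict String Int).items = [] from rfl, List.nil_append]
  apply List.map_congr_left
  intro p hp
  exact Prod.ext rfl (pvInterCount inc p hp)

-- B-side voting loop: lookup-count per category
lemma pvVoteLoop (l : List String) (d : PySem.Dict String Int) (c : String) :
    (l.foldl
      (fun d f =>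
        match CATEGORY_OF.get? f with
        | some c => d.modify c 0 (· + 1)
        | none => d) d).getD c 0
      = d.getD c 0 + (l.countP (fun f => CATEGORY_OF.get? f == some c) : Int) := by
  induction l generalizing d with
  | nil => simp
  | cons f l ih =>
    simp only [List.foldl_cons, List.countP_cons]
    cases h : CATEGORY_OF.get? f with
    | none => simp [ih]
    | some c' =>
      simp only [ih, PySem.Dict.getD_modify]
      by_cases hc : c = c'
      · simp [hc]; ring
      · simp only [if_neg hc]
        simp
        exact fun hh => hc hh.symm

-- B-side voting loop: the keys are untouched
lemma pvVoteKeys (l : List String) (d : PySem.Dict String Int)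
    (hd : ∀ c ∈ pvCats, d.contains c = true) :
    (l.foldl
      (fun d f =>
        match CATEGORY_OF.get? f with
        | some c => d.modify c 0 (· + 1)
        | none => d) d).keys = d.keys := by
  induction l generalizing d with
  | nil => rfl
  | cons f l ih =>
    simp only [List.foldl_cons]
    cases h : CATEGORY_OF.get? f with
    | none =>
      exact ih d hd
    | some c' =>
      rw [ih, PySem.Dict.keys_modify, PySem.Dict.keys_insert_of_contains _ _ (hd c' (pvIdx_cats f c' h))]
      intro c hc
      rw [PySem.Dict.contains_modify]
      simp [hd c hc]

-- B-side: the counts dict's items are pvScores of the incoming features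
lemma pvScoresB (inc : List String) :
    (inc.foldl
      (fun d f =>
        match CATEGORY_OF.get? f with
        | some c => d.modify c 0 (· + 1)
        | none => d)
      (PySem.Dict.ofList (THREAT_FEATURE_MAP.keys.map (fun c => (c, (0 : Int)))))).items
      = pvScores inc := by
  have hkeys : (inc.foldl
      (fun d f =>
        match CATEGORY_OF.get? f with
        | some c => d.modify c 0 (· + 1)
        | none => d)
      (PySem.Dict.ofList (THREAT_FEATURE_MAP.keys.map (fun c => (c, (0 : Int)))))).keys = pvCats := by
    rw [pvVoteKeys]
    · rfl
    · decide
  rw [PySem.Dict.items_eq_map_keys _ (by rw [hkeys]; decide) 0, hkeys]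
  apply List.map_congr_left
  intro c hc
  rw [pvVoteLoop]
  have h0 : (PySem.Dict.ofList (THREAT_FEATURE_MAP.keys.map (fun c => (c, (0 : Int))))).getD c 0 = 0 := by
    have hall : ∀ c' ∈ pvCats,
        (PySem.Dict.ofList (THREAT_FEATURE_MAP.keys.map (fun c => (c, (0 : Int))))).getD c' 0 = 0 := by decide
    exact hall c hc
  rw [h0, zero_add]

-- the single-pass argmax fold, characterised
lemma pvFoldSpec (l : List (String × Int)) (b : Int) (bc : Option String) (t : Bool) :
    l.foldl
      (fun s p =>
        if p.2 > s.1 then (p.2, some p.1, false)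
        else if p.2 == s.1 then (s.1, s.2.1, true)
        else s)
      (b, bc, t)
    = ((l.map (fun p => p.2)).foldl max b,
       if b < (l.map (fun p => p.2)).foldl max b then
         (l.find? (fun p => p.2 == (l.map (fun p => p.2)).foldl max b)).map (fun p => p.1)
       else bc,
       if b < (l.map (fun p => p.2)).foldl max b then
         decide (2 ≤ l.countP (fun p => p.2 == (l.map (fun p => p.2)).foldl max b))
       else (t || l.any (fun p => p.2 == b))) := by
  induction l generalizing b bc t with
  | nil => simp
  | cons q l ih =>
    simp only [List.foldl_cons, List.map_cons, List.find?_cons, List.countP_cons, List.any_cons]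
    by_cases h1 : q.2 > b
    · rw [if_pos h1, ih]
      have hmax : max b q.2 = q.2 := by omega
      have hle : q.2 ≤ (l.map (fun p => p.2)).foldl max q.2 := (PySem.List.le_foldl_max _ _).1
      rw [hmax]
      have hbm : b < (l.map (fun p => p.2)).foldl max q.2 := by omega
      by_cases h2 : q.2 < (l.map (fun p => p.2)).foldl max q.2
      · have hq : (q.2 == (l.map (fun p => p.2)).foldl max q.2) = false := by simp; omega
        simp only [if_pos h2, if_pos hbm, hq]
        simp
      · have heq : (l.map (fun p => p.2)).foldl max q.2 = q.2 := by omega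
        have hq : (q.2 == (l.map (fun p => p.2)).foldl max q.2) = true := by simp [heq]
        simp only [if_neg h2, if_pos hbm, hq, Prod.mk.injEq, if_true]
        refine ⟨trivial, by simp, ?_⟩
        rw [Bool.eq_iff_iff]
        simp only [heq, Bool.false_or, decide_eq_true_eq, List.any_eq_true]
        rw [show (2 ≤ List.countP (fun p => p.2 == q.2) l + 1) ↔
            0 < List.countP (fun p => p.2 == q.2) l from by omega]
        rw [List.countP_pos_iff]
    · rw [if_neg h1]
      have hmax : max b q.2 = b := by omega
      have hleb : b ≤ (l.map (fun p => p.2)).foldl max b := (PySem.List.le_foldl_max _ _).1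
      by_cases h2 : q.2 == b
      · rw [if_pos h2, ih, hmax]
        have hb : q.2 = b := by simpa using h2
        by_cases h3 : b < (l.map (fun p => p.2)).foldl max b
        · have hq : (q.2 == (l.map (fun p => p.2)).foldl max b) = false := by
            simp; omega
          simp only [if_pos h3, hq]
          simp
        · simp only [if_neg h3, Prod.mk.injEq]
          refine ⟨trivial, trivial, ?_⟩
          simp [hb]
      · rw [if_neg h2, ih, hmax]
        have hb : ¬ q.2 = b := by simpa using h2
        have hlt : q.2 < b := by omega
        have hq : (q.2 == (l.map (fun p => p.2)).foldl max b) = false := by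
          simp; omega
        have h2' : (q.2 == b) = false := by simpa using h2
        by_cases h3 : b < (l.map (fun p => p.2)).foldl max b
        · simp only [if_pos h3, hq]
          simp
        · simp only [if_neg h3, h2', Prod.mk.injEq]
          simp

-- the two winner-selection strategies agree on any non-empty table of nonneg scores
lemma pvPost_eq (l : List (String × Int)) (hl : l ≠ []) (h0 : ∀ p ∈ l, 0 ≤ p.2) :
    pvPostA l = pvPostB l := by
  obtain ⟨x, rest, rfl⟩ : ∃ x rest, l = x :: rest := by
    cases l with
    | nil => exact absurd rfl hl
    | cons x rest => exact ⟨x, rest, rfl⟩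
  have hx0 : (0 : Int) ≤ x.2 := h0 x (by simp)
  have hmax0 : max (0 : Int) x.2 = x.2 := by omega
  simp only [pvPostA, pvPostB, List.foldl_cons, List.map_cons]
  rw [PySem.List.max?_id_cons]
  have hstep :
      (rest.foldl
        (fun s p =>
          if p.2 > s.1 then (p.2, some p.1, false)
          else if p.2 == s.1 then (s.1, s.2.1, true)
          else s)
        (if x.2 > (0 : Int) then (x.2, some x.1, false)
         else if x.2 == (0 : Int) then ((0 : Int), (none : Option String), true)
         else ((0 : Int), (none : Option String), false)))
      = ((x :: rest).foldl
        (fun s p =>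
          if p.2 > s.1 then (p.2, some p.1, false)
          else if p.2 == s.1 then (s.1, s.2.1, true)
          else s)
        ((0 : Int), (none : Option String), false)) := by
    simp [List.foldl_cons]
  rw [hstep, pvFoldSpec]
  simp only [List.map_cons, List.foldl_cons, hmax0]
  set m := (rest.map (fun p => p.2)).foldl max x.2 with hm
  have hxm : x.2 ≤ m := (PySem.List.le_foldl_max _ _).1
  have hm0 : (0 : Int) ≤ m := le_trans hx0 hxm
  by_cases hz : m = 0
  · simp [hz]
  · have hpos : (0 : Int) < m := lt_of_le_of_ne hm0 (fun h => hz h.symm)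
    have hmz : (m == (0 : Int)) = false := by simp; omega
    rw [hmz]
    simp only [if_pos hpos, Bool.false_eq_true, if_false]
    have hcnt : 0 < (x :: rest).countP (fun p => p.2 == m) := by
      rw [List.countP_pos_iff]
      rcases PySem.List.foldl_max_mem (rest.map (fun p => p.2)) x.2 with h | h
      · exact ⟨x, by simp, by simp only [beq_iff_eq]; exact (h.symm.trans hm.symm)⟩
      · obtain ⟨p, hp, hpm⟩ := List.mem_map.mp h
        exact ⟨p, by simp [hp], by simp only [beq_iff_eq]; exact hpm.trans hm.symm⟩
    by_cases h2 : 2 ≤ (x :: rest).countP (fun p => p.2 == m)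
    · have hlen : 1 < (((x :: rest).filter (fun p => p.2 == m)).map (fun p => p.1)).length := by
        simpa [← List.countP_eq_length_filter] using h2
      rw [if_pos hlen]
      have htie : decide (2 ≤ (x :: rest).countP (fun p => p.2 == m)) = true := by
        simpa using h2
      rw [htie]
      simp
    · have hone : (x :: rest).countP (fun p => p.2 == m) = 1 := by omega
      have hlen : ¬ 1 < (((x :: rest).filter (fun p => p.2 == m)).map (fun p => p.1)).length := by
        simp [← List.countP_eq_length_filter, hone]
      rw [if_neg hlen]
      have htie : decide (2 ≤ (x :: rest).countP (fun p => p.2 == m)) = false := by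
        simp; omega
      rw [htie]
      obtain ⟨p, hfil⟩ : ∃ p, (x :: rest).filter (fun p => p.2 == m) = [p] := by
        rw [List.countP_eq_length_filter] at hone
        exact List.length_eq_one_iff.mp hone
      have hfind : (x :: rest).find? (fun p => p.2 == m) = some p := by
        rw [← List.head?_filter, hfil]; rfl
      rw [hfind, hfil]
      simp [hpos]

-- ===== VERDICT (by name: the statement is the Claim_ definition above) =====
theorem classify_threat_spec : Claim_equal_classify_threat := by
  intro top _
  unfold Spec_classify_threat
  by_cases h : top = []
  · simp [classify_threat, classify_threat_alt, h]
  · have hA : classify_threat top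
        = pvPostA (pvScores (PySem.Set.ofList (top.map (fun p => pyNormalize p.1)))) := by
      simp only [classify_threat, if_neg h, PySem.Dict.values, pvScoresA, pvPostA]
    have hB : classify_threat_alt top
        = pvPostB (pvScores (PySem.Set.ofList (top.map (fun p => pyNormalize p.1)))) := by
      simp only [classify_threat_alt, if_neg h, pvScoresB, pvPostB]
    rw [hA, hB]
    exact pvPost_eq _ (by simp [pvScores, pvCats]) (by
      intro p hp
      simp only [pvScores, List.mem_map] at hp
      obtain ⟨c, _, rfl⟩ := hp
      positivity)
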